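-- pv_equiv track=rewrite | github.com/brambillagabrielle/daily-coding-challenges | 2025/09/23-string-mirror.py | is_mirror
-- ===== SOURCE A (Python) =====
-- def is_mirror(str1, str2):
--     cleaned_str1 = ""
--     for s in str1:
--         if s.isalpha():
--             cleaned_str1 += s
--
--     cleaned_str2 = ""
--     for s in str2:
--         if s.isalpha():
--             cleaned_str2 += s
--
--     if len(cleaned_str1) != len(cleaned_str2):
--         return False
--     else:
--         ind = 0
--         for s in cleaned_str1:
--             if s != cleaned_str2[len(cleaned_str2) - ind - 1]:
--                 return False
--             ind += 1
--
--     return True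
-- ===== SOURCE B (Python) =====
-- def is_mirror(str1, str2):
--     # Two pointers: scan str1 forward, str2 backward, skipping non-alpha chars.
--     j = len(str2) - 1
--     for c in str1:
--         if not c.isalpha():
--             continue
--         while j >= 0 and not str2[j].isalpha():
--             j -= 1
--         if j < 0 or c != str2[j]:
--             return False
--         j -= 1
--     while j >= 0 and not str2[j].isalpha():
--         j -= 1
--     return j < 0
-- ===== Notes on version B (the rewrite author's own statement) =====
-- stated objective: faster
-- what changed: B never builds the cleaned strings: it walks str1 forward and str2 backward with a lagging index, skipping non-alphabetic characters on the fly and comparing in place, avoiding A's repeated string concatenation.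
import Mathlib
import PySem

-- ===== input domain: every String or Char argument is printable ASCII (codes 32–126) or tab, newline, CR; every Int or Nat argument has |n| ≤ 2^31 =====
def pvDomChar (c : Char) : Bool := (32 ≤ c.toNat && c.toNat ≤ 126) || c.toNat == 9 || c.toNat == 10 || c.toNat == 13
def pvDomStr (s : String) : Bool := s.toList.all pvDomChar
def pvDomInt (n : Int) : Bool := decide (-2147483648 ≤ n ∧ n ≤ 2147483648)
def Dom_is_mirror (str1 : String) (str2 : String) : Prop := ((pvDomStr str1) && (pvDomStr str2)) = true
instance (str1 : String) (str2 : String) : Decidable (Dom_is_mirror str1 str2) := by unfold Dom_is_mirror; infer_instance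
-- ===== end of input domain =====

-- B replaces A's build-two-cleaned-strings-then-index-compare with a one-pass two-pointer
-- scan (str1 forward, str2 backward) that skips non-alphabetic characters in place.

-- ===== PORT A =====
-- the 'for s in cleaned_str1' loop with its running index 'ind' (early return False on mismatch)
def pvLoopA (cleaned2 : List Char) : List Char → Int → Bool
  | [], _ => true
  | s :: rest, ind =>
    -- Python would raise IndexError where pyGet? is none; unreachable under the length guard
    match PySem.List.pyGet? cleaned2 ((cleaned2.length : Int) - ind - 1) with
    | none => false
    | some d => if s ≠ d then false else pvLoopA cleaned2 rest (ind + 1)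

def is_mirror (str1 : String) (str2 : String) : Bool :=
  let cleaned1 := str1.toList.foldl (fun acc s => if PySem.Chars.isalpha s then acc ++ [s] else acc) []
  let cleaned2 := str2.toList.foldl (fun acc s => if PySem.Chars.isalpha s then acc ++ [s] else acc) []
  if cleaned1.length ≠ cleaned2.length then false
  else pvLoopA cleaned2 cleaned1 0

-- ===== PORT B =====
-- the 'while j >= 0 and not str2[j].isalpha(): j -= 1' loop: scanning str2 backward from j
-- is scanning the reversed character list forward, so the skip is a dropWhile on that list
def pvSkip (l : List Char) : List Char := l.dropWhile (fun c => !PySem.Chars.isalpha c)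

-- the 'for c in str1' loop; second argument = the not-yet-consumed reversed tail of str2
def pvGoB : List Char → List Char → Bool
  | [], l2 => (pvSkip l2).isEmpty                 -- final skip, then 'return j < 0'
  | c :: r, l2 =>
    if PySem.Chars.isalpha c then
      match pvSkip l2 with
      | [] => false                                -- 'if j < 0: return False'
      | d :: s => if c ≠ d then false else pvGoB r s
    else pvGoB r l2                                -- 'continue'

def is_mirror_alt (str1 : String) (str2 : String) : Bool :=
  pvGoB str1.toList str2.toList.reverse

-- ===== PRECONDITION & SPEC =====
def Spec_is_mirror (str1 : String) (str2 : String) (out : Bool) : Prop := out = is_mirror_alt str1 str2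
instance (str1 : String) (str2 : String) (out : Bool) : Decidable (Spec_is_mirror str1 str2 out) := by unfold Spec_is_mirror; infer_instance

-- ===== CLAIM (what is proved, stated in full; the proofs are below) =====
def Claim_equal_is_mirror : Prop := ∀ (str1 : String) (str2 : String), Dom_is_mirror str1 str2 → Spec_is_mirror str1 str2 (is_mirror str1 str2)

-- ===== LEMMAS AND PROOFS =====

theorem pvSkip_isEmpty (l : List Char) :
    (pvSkip l).isEmpty = (l.filter PySem.Chars.isalpha).isEmpty := by
  induction l with
  | nil => rfl
  | cons c t ih =>
    by_cases h : PySem.Chars.isalpha c = true <;>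
      simp [pvSkip, List.dropWhile, List.filter, h, ih] at ih ⊢

theorem pvFilter_eq_skip (l : List Char) :
    l.filter PySem.Chars.isalpha =
      (match pvSkip l with
       | [] => []
       | d :: s => d :: s.filter PySem.Chars.isalpha) := by
  induction l with
  | nil => rfl
  | cons c t ih =>
    by_cases h : PySem.Chars.isalpha c = true <;>
      simp [pvSkip, List.dropWhile, List.filter, h, ih] at ih ⊢

theorem pvSkip_head (l : List Char) (d : Char) (s : List Char)
    (h : pvSkip l = d :: s) : PySem.Chars.isalpha d = true := by
  induction l with
  | nil => simp [pvSkip] at h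
  | cons c t ih =>
    by_cases hc : PySem.Chars.isalpha c = true
    · simp [pvSkip, List.dropWhile, hc] at h
      simp [← h.1, hc]
    · simp [pvSkip, List.dropWhile, hc] at h
      exact ih (by simpa [pvSkip] using h)

theorem pvGoB_eq (l1 : List Char) : ∀ l2 : List Char,
    pvGoB l1 l2 = decide (l1.filter PySem.Chars.isalpha = l2.filter PySem.Chars.isalpha) := by
  induction l1 with
  | nil =>
    intro l2
    have h := pvSkip_isEmpty l2
    simp only [pvGoB, List.filter_nil]
    rcases hcase : (l2.filter PySem.Chars.isalpha) with _ | ⟨d, s⟩ <;>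
      simp [hcase, h] at *
  | cons c r ih =>
    intro l2
    have hf := pvFilter_eq_skip l2
    by_cases h : PySem.Chars.isalpha c = true
    · rcases hs : pvSkip l2 with _ | ⟨d, s⟩
      · simp [pvGoB, h, hs, hf, List.filter]
      · have hd := pvSkip_head l2 d s hs
        by_cases hcd : c = d <;> simp [pvGoB, h, hs, hf, hd, List.filter, ih, hcd]
    · simp [pvGoB, h, List.filter, ih]

theorem pvLoopA_eq (c2 : List Char) : ∀ (c1 : List Char) (k : Nat),
    c1.length + k = c2.length →
    pvLoopA c2 c1 (k : Int) = decide (c1 = (c2.take (c2.length - k)).reverse) := by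
  intro c1
  induction c1 with
  | nil =>
    intro k hk
    have h0 : c2.length - k = 0 := by simp at hk; omega
    simp [pvLoopA, h0]
  | cons s rest ih =>
    intro k hk
    have hlt : rest.length < c2.length := by simp at hk; omega
    have hidx : (c2.length : Int) - (k : Int) - 1 = ((rest.length : Nat) : Int) := by
      simp at hk; omega
    have hget : PySem.List.pyGet? c2 ((c2.length : Int) - (k : Int) - 1) = some c2[rest.length] := by
      rw [hidx, PySem.List.pyGet?_natCast, List.getElem?_eq_getElem hlt]
    have htake : c2.take (c2.length - k) = c2.take rest.length ++ [c2[rest.length]] := by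
      have h1 : c2.length - k = rest.length + 1 := by simp at hk; omega
      rw [h1, List.take_add_one, List.getElem?_eq_getElem hlt]; rfl
    have hrec := ih (k + 1) (by simp at hk ⊢; omega)
    have hk1 : ((k : Int) + 1) = ((k + 1 : Nat) : Int) := by push_cast; ring
    have hsub : c2.length - (k + 1) = rest.length := by simp at hk; omega
    simp only [pvLoopA, hget, htake, List.reverse_append, List.reverse_singleton,
      List.singleton_append]
    by_cases hcd : s = c2[rest.length]
    · rw [if_neg (by simp [hcd]), hk1, hrec, hsub, hcd]
      simp
    · simp [hcd]

theorem pvFoldl_clean (l : List Char) :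
    l.foldl (fun acc s => if PySem.Chars.isalpha s then acc ++ [s] else acc) [] =
      l.filter PySem.Chars.isalpha := by
  simpa using PySem.List.foldl_append_if_eq_filter PySem.Chars.isalpha l []

-- ===== VERDICT (by name: the statement is the Claim_ definition above) =====
theorem is_mirror_spec : Claim_equal_is_mirror := by
  intro str1 str2 _
  unfold Spec_is_mirror is_mirror is_mirror_alt
  simp only [pvFoldl_clean, pvGoB_eq, List.filter_reverse]
  set f1 := str1.toList.filter PySem.Chars.isalpha with hf1
  set f2 := str2.toList.filter PySem.Chars.isalpha with hf2
  by_cases hlen : f1.length = f2.length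
  · have h0 : (0 : Int) = ((0 : Nat) : Int) := rfl
    rw [if_neg (by simp [hlen]), h0, pvLoopA_eq f2 f1 0 (by omega)]
    simp
  · rw [if_pos (by simpa using hlen)]
    have : f1 ≠ f2.reverse := by
      intro h; apply hlen; rw [h, List.length_reverse]
    simp [this]
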